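-- pv_equiv track=rewrite | github.com/sbd530/python-study | lab_8/windows/morsecode.py | is_validated_english_sentence
-- ===== SOURCE A (Python) =====
-- def is_validated_english_sentence(user_input):
--     # Input:
--     #     - user_input : 문자열값으로 사용자가 입력하는 문자
--     # Output:
--     #     - 입력한 값이 아래에 해당될 경우 False, 그렇지 않으면 True
--     #       1) 숫자가 포함되어 있거나,
--     #       2) _@#$%^&*()-+=[]{}"';:\|`~ 와 같은 특수문자가 포함되어 있거나
--     #       3) 영어와 문장부호(.,!?)를 제외하면 입력값이 없거나 빈칸만 입력했을 경우
--     characters = ".,!?"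
--     forbidden = """_@#$%^&*()-+=[]{}"';:|`~\\"""
--     numbers = [str(i) for i in range(10)]
--
--     string = "".join(x for x in user_input if x not in characters)
--     string = string.strip()
--
--     if len(string) == 0:
--         return False
--
--     for s in string:
--         if (s in forbidden) or (s in numbers):
--             return False
--
--     return True
-- ===== SOURCE B (Python) =====
-- def is_validated_english_sentence(user_input):
--     forbidden = """_@#$%^&*()-+=[]{}"';:|`~\\"""
--     has_content = False
--     for s in user_input:
--         if s in ".,!?":
--             continue
--         if s in forbidden or s.isdigit():
--             return False
--         if not s.isspace():
--             has_content = True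
--     return has_content
-- ===== Notes on version B (the rewrite author's own statement) =====
-- stated objective: simpler
-- what changed: Replaces A's build-filtered-string, strip, emptiness check and separate forbidden/digit scan with a single fused pass over the input that rejects on the first forbidden/digit character and tracks a has-content flag for non-space, non-punctuation characters.
import Mathlib
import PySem

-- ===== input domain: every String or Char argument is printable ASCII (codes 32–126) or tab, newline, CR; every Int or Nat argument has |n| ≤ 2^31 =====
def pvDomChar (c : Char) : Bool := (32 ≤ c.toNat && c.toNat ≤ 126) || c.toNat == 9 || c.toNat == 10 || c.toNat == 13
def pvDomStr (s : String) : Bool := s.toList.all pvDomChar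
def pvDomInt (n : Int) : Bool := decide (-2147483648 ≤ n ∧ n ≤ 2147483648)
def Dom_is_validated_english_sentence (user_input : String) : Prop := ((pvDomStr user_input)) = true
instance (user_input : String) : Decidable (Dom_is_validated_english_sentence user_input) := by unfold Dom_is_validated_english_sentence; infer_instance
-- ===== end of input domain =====

-- B fuses A's build-filtered-string / strip / emptiness-check / forbidden-scan passes into one
-- early-exit traversal with a has-content flag (objective: simpler).


-- ===== PORT A =====
-- the 'for s in string: if (s in forbidden) or (s in numbers): return False / return True' loop
def pvACheck (forbidden : List Char) (numbers : List (List Char)) : List Char → Bool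
  | [] => true
  | s :: rest =>
    if PySem.Chars.isIn [s] forbidden || numbers.contains [s] then false
    else pvACheck forbidden numbers rest

def is_validated_english_sentence (user_input : String) : Bool :=
  let characters : List Char := ".,!?".toList
  let forbidden : List Char := "_@#$%^&*()-+=[]{}\"';:|`~\\".toList
  let numbers : List (List Char) := (PySem.List.pyRange 0 10 1).map PySem.Int.toChars
  let string : List Char := user_input.toList.filter (fun x => !PySem.Chars.isIn [x] characters)
  let string2 : List Char := PySem.Chars.strip string
  if string2.length = 0 then false
  else pvACheck forbidden numbers string2

-- ===== PORT B =====
-- B's single loop: skip '.,!?', reject forbidden/digit immediately, track has_content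
def pvBLoop (forbidden : List Char) : List Char → Bool → Bool
  | [], has_content => has_content
  | s :: rest, has_content =>
    if PySem.Chars.isIn [s] ".,!?".toList then pvBLoop forbidden rest has_content
    else if PySem.Chars.isIn [s] forbidden || PySem.Chars.isdigit s then false
    else pvBLoop forbidden rest (if PySem.Chars.isspace s then has_content else true)

def is_validated_english_sentence_alt (user_input : String) : Bool :=
  pvBLoop "_@#$%^&*()-+=[]{}\"';:|`~\\".toList user_input.toList false

-- ===== PRECONDITION & SPEC =====
def Spec_is_validated_english_sentence (user_input : String) (out : Bool) : Prop := out = is_validated_english_sentence_alt user_input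
instance (user_input : String) (out : Bool) : Decidable (Spec_is_validated_english_sentence user_input out) := by unfold Spec_is_validated_english_sentence; infer_instance

-- ===== CLAIM (what is proved, stated in full; the proofs are below) =====
def Claim_equal_is_validated_english_sentence : Prop := ∀ (user_input : String), Dom_is_validated_english_sentence user_input → Spec_is_validated_english_sentence user_input (is_validated_english_sentence user_input)

-- ===== LEMMAS AND PROOFS =====

-- proof-side abbreviations for the character classes both programs test
def pvFb : List Char := "_@#$%^&*()-+=[]{}\"';:|`~\\".toList
def pvNums : List (List Char) := (PySem.List.pyRange 0 10 1).map PySem.Int.toChars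
def pvPunct (c : Char) : Bool := PySem.Chars.isIn [c] ".,!?".toList
def pvBad (c : Char) : Bool := PySem.Chars.isIn [c] pvFb || PySem.Chars.isdigit c
def pvContent (c : Char) : Bool := !pvPunct c && !PySem.Chars.isspace c

theorem pv_isIn_singleton (c : Char) (s : List Char) : PySem.Chars.isIn [c] s = true ↔ c ∈ s := by
  rw [PySem.Chars.isIn_iff_infix, List.singleton_infix_iff]

theorem pv_nums_contains (c : Char) : pvNums.contains [c] = PySem.Chars.isdigit c := by
  have h : pvNums = [['0'],['1'],['2'],['3'],['4'],['5'],['6'],['7'],['8'],['9']] := by decide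
  rcases c with ⟨⟨⟨n, hn⟩⟩, hv⟩
  simp only [h, PySem.Chars.isdigit]
  simp [Char.le_def, Char.ext_iff, UInt32.le_iff_toNat_le, UInt32.ext_iff]
  rw [Bool.eq_iff_iff]
  simp only [Bool.or_eq_true, Bool.and_eq_true, decide_eq_true_eq]
  omega

theorem pv_bad_not_space (c : Char) (h : pvBad c = true) : PySem.Chars.isspace c = false := by
  rcases Bool.or_eq_true .. |>.mp h with hf | hd
  · have hm := (pv_isIn_singleton c pvFb).mp hf
    have hall : pvFb.all (fun c => !PySem.Chars.isspace c) = true := by decide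
    have := List.all_eq_true.mp hall c hm
    simpa using this
  · rcases c with ⟨⟨⟨n, hn⟩⟩, hv⟩
    simp only [PySem.Chars.isdigit, PySem.Chars.isspace, Char.le_def] at *
    simp [UInt32.le_iff_toNat_le] at *
    omega

theorem pv_aCheck_eq_all (l : List Char) :
    pvACheck pvFb pvNums l = l.all (fun c => !pvBad c) := by
  induction l with
  | nil => rfl
  | cons s rest ih =>
    show (if PySem.Chars.isIn [s] pvFb || pvNums.contains [s] then false
          else pvACheck pvFb pvNums rest) = _
    rw [pv_nums_contains]
    by_cases hb : pvBad s = true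
    · simp [pvBad] at hb ⊢
      rcases hb with hb | hb <;> simp [hb]
    · simp only [pvBad] at hb
      simp [Bool.or_eq_true] at hb
      simp [hb.1, hb.2, ih, pvBad]

theorem pv_mem_dropWhile {p : Char → Bool} {c : Char} {l : List Char}
    (hc : p c = false) (hm : c ∈ l) : c ∈ l.dropWhile p := by
  have := List.takeWhile_append_dropWhile (p := p) (l := l)
  rw [← this] at hm
  rcases List.mem_append.mp hm with h | h
  · exact absurd (List.mem_takeWhile_imp h) (by simp [hc])
  · exact h

theorem pv_mem_strip {c : Char} {l : List Char} (hc : PySem.Chars.isspace c = false) :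
    c ∈ PySem.Chars.strip l ↔ c ∈ l := by
  constructor
  · intro h
    simp only [PySem.Chars.strip, PySem.Chars.rstrip, PySem.Chars.lstrip] at h
    have h1 := (List.dropWhile_sublist _).mem (List.mem_reverse.mp h)
    exact (List.dropWhile_sublist _).mem (List.mem_reverse.mp h1)
  · intro h
    simp only [PySem.Chars.strip, PySem.Chars.rstrip, PySem.Chars.lstrip]
    rw [List.mem_reverse]
    exact pv_mem_dropWhile hc (List.mem_reverse.mpr (pv_mem_dropWhile hc h))

theorem pv_strip_eq_nil_iff (l : List Char) :
    PySem.Chars.strip l = [] ↔ ∀ c ∈ l, PySem.Chars.isspace c = true := by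
  simp only [PySem.Chars.strip, PySem.Chars.rstrip, PySem.Chars.lstrip,
    List.reverse_eq_nil_iff, List.dropWhile_eq_nil_iff, List.mem_reverse]
  constructor
  · intro h c hm
    have := List.takeWhile_append_dropWhile (p := PySem.Chars.isspace) (l := l)
    rw [← this] at hm
    rcases List.mem_append.mp hm with hm | hm
    · exact List.mem_takeWhile_imp hm
    · exact h c hm
  · intro h c hm
    exact h c ((List.dropWhile_sublist _).mem hm)

theorem pv_bLoop_false {l : List Char} (hc : Bool)
    (h : ∃ c ∈ l, pvPunct c = false ∧ pvBad c = true) :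
    pvBLoop pvFb l hc = false := by
  induction l generalizing hc with
  | nil => simp at h
  | cons s rest ih =>
    show (if PySem.Chars.isIn [s] ".,!?".toList then pvBLoop pvFb rest hc
          else if PySem.Chars.isIn [s] pvFb || PySem.Chars.isdigit s then false
          else pvBLoop pvFb rest _) = false
    rcases h with ⟨c, hm, hp, hb⟩
    rcases List.mem_cons.mp hm with rfl | hm
    · rw [show (PySem.Chars.isIn [c] ".,!?".toList) = pvPunct c from rfl, hp]
      simp only [if_neg Bool.false_ne_true, pvBad] at hb ⊢
      simp [hb]
    · by_cases hs : PySem.Chars.isIn [s] ".,!?".toList = true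
      · simp only [hs, if_true]; exact ih hc ⟨c, hm, hp, hb⟩
      · simp only [Bool.not_eq_true] at hs
        simp only [hs, Bool.false_eq_true, if_false]
        by_cases hbs : (PySem.Chars.isIn [s] pvFb || PySem.Chars.isdigit s) = true
        · simp [hbs]
        · simp only [Bool.not_eq_true] at hbs
          simp only [hbs, Bool.false_eq_true, if_false]
          exact ih _ ⟨c, hm, hp, hb⟩

theorem pv_bLoop_clean {l : List Char} (hc : Bool)
    (h : ∀ c ∈ l, pvPunct c = true ∨ pvBad c = false) :
    pvBLoop pvFb l hc = (hc || l.any pvContent) := by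
  induction l generalizing hc with
  | nil => simp [pvBLoop]
  | cons s rest ih =>
    show (if PySem.Chars.isIn [s] ".,!?".toList then pvBLoop pvFb rest hc
          else if PySem.Chars.isIn [s] pvFb || PySem.Chars.isdigit s then false
          else pvBLoop pvFb rest _) = _
    have hrest : ∀ c ∈ rest, pvPunct c = true ∨ pvBad c = false :=
      fun c hm => h c (List.mem_cons_of_mem _ hm)
    by_cases hp : pvPunct s = true
    · rw [show (PySem.Chars.isIn [s] ".,!?".toList) = pvPunct s from rfl, hp, if_pos rfl]
      rw [ih hc hrest]
      have : pvContent s = false := by simp [pvContent, hp]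
      simp [List.any_cons, this]
    · have hp' : pvPunct s = false := Bool.not_eq_true _ |>.mp hp
      rw [show (PySem.Chars.isIn [s] ".,!?".toList) = pvPunct s from rfl, hp']
      simp only [Bool.false_eq_true, if_false]
      have hb : pvBad s = false := by
        rcases h s List.mem_cons_self with h1 | h1
        · exact absurd h1 hp
        · exact h1
      rw [show (PySem.Chars.isIn [s] pvFb || PySem.Chars.isdigit s) = pvBad s from rfl, hb]
      simp only [Bool.false_eq_true, if_false]
      rw [ih _ hrest]
      have : pvContent s = !PySem.Chars.isspace s := by simp [pvContent, hp']
      by_cases hs : PySem.Chars.isspace s = true <;>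
        simp [hs, this, List.any_cons]

-- ===== VERDICT (by name: the statement is the Claim_ definition above) =====
theorem is_validated_english_sentence_spec : Claim_equal_is_validated_english_sentence := by
  intro user_input _
  unfold Spec_is_validated_english_sentence
  unfold is_validated_english_sentence is_validated_english_sentence_alt
  simp only []
  rw [show ("_@#$%^&*()-+=[]{}\"';:|`~\\".toList) = pvFb from rfl,
     show ((PySem.List.pyRange 0 10 1).map PySem.Int.toChars) = pvNums from rfl]
  set cs := user_input.toList with hcs
  have hfiltpred : (fun x => !PySem.Chars.isIn [x] ".,!?".toList) = (fun x => !pvPunct x) := rfl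
  rw [hfiltpred]
  set filtered := cs.filter (fun x => !pvPunct x) with hfil
  set stripped := PySem.Chars.strip filtered with hstr
  by_cases hbad : ∃ c ∈ cs, pvPunct c = false ∧ pvBad c = true
  · -- a forbidden/digit character occurs outside '.,!?': both return false
    rw [pv_bLoop_false false hbad]
    rcases hbad with ⟨c, hm, hp, hb⟩
    have hcne : c ∈ filtered := by
      rw [hfil, List.mem_filter]; exact ⟨hm, by simp [hp]⟩
    have hcs : c ∈ stripped := by
      rw [hstr, pv_mem_strip (pv_bad_not_space c hb)]; exact hcne
    have hne : stripped.length ≠ 0 := by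
      intro h0
      rw [List.length_eq_zero_iff] at h0
      rw [h0] at hcs; simp at hcs
    rw [if_neg hne, show pvACheck pvFb pvNums stripped = _ from pv_aCheck_eq_all stripped]
    rw [List.all_eq_false]
    exact ⟨c, hcs, by simp [hb]⟩
  · push_neg at hbad
    have hclean : ∀ c ∈ cs, pvPunct c = true ∨ pvBad c = false := by
      intro c hm
      by_cases hp : pvPunct c = true
      · exact Or.inl hp
      · exact Or.inr (by
          by_contra hb
          exact absurd (hbad c hm (Bool.not_eq_true _ |>.mp hp)) (by simp [hb]))
    rw [pv_bLoop_clean false hclean, Bool.false_or]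
    by_cases h0 : stripped.length = 0
    · -- everything left after removing '.,!?' is whitespace: both return false
      rw [if_pos h0]
      rw [List.length_eq_zero_iff, hstr, pv_strip_eq_nil_iff] at h0
      symm
      rw [List.any_eq_false]
      intro c hm
      by_cases hp : pvPunct c = true
      · simp [pvContent, hp]
      · have hp' : pvPunct c = false := Bool.not_eq_true _ |>.mp hp
        have hcf : c ∈ filtered := by rw [hfil, List.mem_filter]; exact ⟨hm, by simp [hp']⟩
        simp [pvContent, h0 c hcf]
    · rw [if_neg h0, pv_aCheck_eq_all]
      have hall : stripped.all (fun c => !pvBad c) = true := by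
        rw [List.all_eq_true]
        intro c hmc
        have hcf : c ∈ filtered := by
          rw [hstr] at hmc
          simp only [PySem.Chars.strip, PySem.Chars.rstrip, PySem.Chars.lstrip] at hmc
          have h1 := (List.dropWhile_sublist _).mem (List.mem_reverse.mp hmc)
          exact (List.dropWhile_sublist _).mem (List.mem_reverse.mp h1)
        rw [hfil, List.mem_filter] at hcf
        rcases hclean c hcf.1 with h1 | h1
        · exact absurd h1 (by simpa using hcf.2)
        · simp [h1]
      rw [hall]
      symm
      rw [List.any_eq_true]
      have hne : stripped ≠ [] := fun h => h0 (by simp [h])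
      have : ¬ ∀ c ∈ filtered, PySem.Chars.isspace c = true := by
        intro hallsp
        exact hne ((pv_strip_eq_nil_iff filtered).mpr hallsp)
      push_neg at this
      rcases this with ⟨c, hmc, hsp⟩
      have hsp' : PySem.Chars.isspace c = false := Bool.not_eq_true _ |>.mp hsp
      rw [hfil, List.mem_filter] at hmc
      exact ⟨c, hmc.1, by simp [pvContent, hsp']; simpa using hmc.2⟩
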